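-- pv_equiv track=rewrite | github.com/pypi-data/pypi-mirror-391 | packages/importobot/importobot-0.1.4-py3-none-any.whl/importobot/medallion/bronze/test_case_complexity_analyzer.py | _count_format_indicators
-- ===== SOURCE A (Python) =====
-- from typing import Any
--
-- def _count_format_indicators(test_data: dict[str, Any]) -> int:
--     """Count format-specific indicators."""
--     format_indicators = 0
--
--     # Define format field mappings
--     format_fields = {
--         "zephyr": ["testCase", "execution", "cycle"],
--         "jira": ["issues", "testExecutions", "xrayInfo"],
--         "testlink": ["testsuites", "testsuite", "testcase"],
--         "testrail": ["cases", "suite", "run", "results"],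
--     }
--
--     for fields in format_fields.values():
--         for field in fields:
--             if field in test_data:
--                 format_indicators += 1
--
--     return format_indicators
-- ===== SOURCE B (Python) =====
-- from typing import Any
--
-- # All 13 candidate field names across the four formats (pairwise distinct).
-- _FORMAT_FIELD_NAMES = frozenset({
--     "testCase", "execution", "cycle",
--     "issues", "testExecutions", "xrayInfo",
--     "testsuites", "testsuite", "testcase",
--     "cases", "suite", "run", "results",
-- })
--
-- def _count_format_indicators(test_data: dict[str, Any]) -> int:
--     """Count format-specific indicators."""
--     count = 0
--     for key in test_data:
--         if key in _FORMAT_FIELD_NAMES: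
--             count += 1
--     return count
-- ===== Notes on version B (the rewrite author's own statement) =====
-- stated objective: alternative
-- what changed: Inverts the traversal: instead of A's nested loop over the four per-format candidate lists probing the dict for each of the 13 names, B makes one pass over the dict's own keys, counting those belonging to a precomputed frozenset of all candidate names; this is correct because the 13 candidate names are pairwise distinct and dict keys are unique, so both counts equal the size of the intersection.
import Mathlib
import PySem

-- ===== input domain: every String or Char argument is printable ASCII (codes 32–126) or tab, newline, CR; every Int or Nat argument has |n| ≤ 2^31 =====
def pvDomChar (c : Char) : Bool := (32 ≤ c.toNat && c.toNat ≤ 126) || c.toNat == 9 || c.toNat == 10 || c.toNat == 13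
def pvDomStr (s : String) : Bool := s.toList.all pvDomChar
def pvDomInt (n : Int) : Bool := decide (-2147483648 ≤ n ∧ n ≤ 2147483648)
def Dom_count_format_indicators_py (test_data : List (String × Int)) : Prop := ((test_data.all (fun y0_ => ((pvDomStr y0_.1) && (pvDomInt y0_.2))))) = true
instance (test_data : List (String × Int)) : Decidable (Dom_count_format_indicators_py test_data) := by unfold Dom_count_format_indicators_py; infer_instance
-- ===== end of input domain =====

-- B inverts the traversal: one pass over the dict's keys counting membership in a precomputed
-- set of the 13 (pairwise distinct) candidate names, instead of A's nested loop over the four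
-- candidate lists probing the dict (objective: alternative).

-- ===== PORT A =====
-- 'field in test_data' (membership in the dict's keys) is ported as an .any scan over the
-- association list's keys, exact for a dict's first-component membership.
def count_format_indicators_py (test_data : List (String × Int)) : Int :=
  let format_fields : PySem.Dict String (List String) :=
    PySem.Dict.ofList
      [("zephyr", ["testCase", "execution", "cycle"]),
       ("jira", ["issues", "testExecutions", "xrayInfo"]),
       ("testlink", ["testsuites", "testsuite", "testcase"]),
       ("testrail", ["cases", "suite", "run", "results"])]
  (PySem.Dict.values format_fields).foldl
    (fun format_indicators fields =>
      fields.foldl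
        (fun format_indicators field =>
          if test_data.any (fun p => p.1 == field) then format_indicators + 1
          else format_indicators)
        format_indicators)
    0

-- ===== PORT B =====
def pvFormatFieldNames : PySem.Set String :=
  PySem.Set.ofList
    ["testCase", "execution", "cycle",
     "issues", "testExecutions", "xrayInfo",
     "testsuites", "testsuite", "testcase",
     "cases", "suite", "run", "results"]

-- 'for key in test_data' iterates the dict's keys in first-occurrence order:
-- PySem.Set.ofList of the association list's keys, exact for dict iteration.
def count_format_indicators_py_alt (test_data : List (String × Int)) : Int :=
  (PySem.Set.ofList (test_data.map Prod.fst)).foldl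
    (fun count key => if pvFormatFieldNames.contains key then count + 1 else count) 0

-- ===== PRECONDITION & SPEC =====
def Spec_count_format_indicators_py (test_data : List (String × Int)) (out : Int) : Prop := out = count_format_indicators_py_alt test_data
instance (test_data : List (String × Int)) (out : Int) : Decidable (Spec_count_format_indicators_py test_data out) := by unfold Spec_count_format_indicators_py; infer_instance

-- ===== CLAIM (what is proved, stated in full; the proofs are below) =====
def Claim_equal_count_format_indicators_py : Prop := ∀ (test_data : List (String × Int)), Dom_count_format_indicators_py test_data → Spec_count_format_indicators_py test_data (count_format_indicators_py test_data)

-- ===== LEMMAS AND PROOFS =====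

def pvNamesList : List String :=
  ["testCase", "execution", "cycle",
   "issues", "testExecutions", "xrayInfo",
   "testsuites", "testsuite", "testcase",
   "cases", "suite", "run", "results"]

-- A unfolds to: count of candidate names whose key occurs in the association list.
theorem count_format_indicators_py_eq_countP (test_data : List (String × Int)) :
    count_format_indicators_py test_data
      = ((pvNamesList.countP
            (fun field => test_data.any (fun p => p.1 == field)) : Nat) : Int) := by
  have hv : PySem.Dict.values (PySem.Dict.ofList
      [("zephyr", ["testCase", "execution", "cycle"]),
       ("jira", ["issues", "testExecutions", "xrayInfo"]),
       ("testlink", ["testsuites", "testsuite", "testcase"]),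
       ("testrail", ["cases", "suite", "run", "results"])])
      = [["testCase", "execution", "cycle"],
         ["issues", "testExecutions", "xrayInfo"],
         ["testsuites", "testsuite", "testcase"],
         ["cases", "suite", "run", "results"]] := by decide
  simp only [count_format_indicators_py, hv, List.foldl_cons, List.foldl_nil,
    PySem.List.foldl_count_if]
  rw [show pvNamesList
      = ["testCase", "execution", "cycle"] ++ ["issues", "testExecutions", "xrayInfo"]
        ++ ["testsuites", "testsuite", "testcase"] ++ ["cases", "suite", "run", "results"] from rfl,
    List.countP_append, List.countP_append, List.countP_append]
  push_cast
  ring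

-- B unfolds to: count of distinct dict keys that are candidate names.
theorem count_format_indicators_py_alt_eq_countP (test_data : List (String × Int)) :
    count_format_indicators_py_alt test_data
      = (((PySem.Set.ofList (test_data.map Prod.fst)).countP
            (fun key => pvFormatFieldNames.contains key) : Nat) : Int) := by
  simp only [count_format_indicators_py_alt, PySem.List.foldl_count_if]
  ring

-- Two Nodup lists count each other's members equally (both sides are |N ∩ K|).
theorem countP_mem_comm {α : Type} [DecidableEq α] (N K : List α)
    (hN : N.Nodup) (hK : K.Nodup) :
    N.countP (fun a => decide (a ∈ K)) = K.countP (fun a => decide (a ∈ N)) := by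
  rw [List.countP_eq_length_filter, List.countP_eq_length_filter]
  apply List.Perm.length_eq
  rw [List.perm_ext_iff_of_nodup (hN.filter _) (hK.filter _)]
  intro a
  simp only [List.mem_filter, decide_eq_true_eq]
  tauto

-- ===== VERDICT (by name: the statement is the Claim_ definition above) =====
theorem count_format_indicators_py_spec : Claim_equal_count_format_indicators_py := by
  intro test_data _
  show count_format_indicators_py test_data = count_format_indicators_py_alt test_data
  rw [count_format_indicators_py_eq_countP, count_format_indicators_py_alt_eq_countP]
  have hnames : pvFormatFieldNames = pvNamesList :=
    PySem.Set.ofList_eq_self_of_nodup _ (by decide)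
  congr 1
  have h1 : (fun field => test_data.any (fun p => p.1 == field))
      = (fun field => decide (field ∈ PySem.Set.ofList (test_data.map Prod.fst))) := by
    funext field
    rw [Bool.eq_iff_iff, List.any_eq_true, decide_eq_true_eq, PySem.Set.mem_ofList]
    simp [List.mem_map, beq_iff_eq]
  have h2 : (fun key => pvFormatFieldNames.contains key)
      = (fun key => decide (key ∈ pvNamesList)) := by
    funext key
    rw [Bool.eq_iff_iff, PySem.Set.contains_iff, decide_eq_true_eq, hnames]
  rw [h1, h2, show pvNamesList.countP _ = _ from rfl]
  exact countP_mem_comm pvNamesList (PySem.Set.ofList (test_data.map Prod.fst))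
    (by decide) (PySem.Set.nodup_ofList _)
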